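-- pv_equiv track=rewrite | github.com/zf0827/InternAgent | internagent/mas/tools/searchers/code_searcher.py | _parse_repos_text
-- ===== SOURCE A (Python) =====
-- from typing import List
--
-- def _parse_repos_text(repos_text: str) -> List[dict]:
--     """
--     Parse the formatted repository string from search_github_repos.
--
--     Args:
--         repos_text: Formatted string containing repository information
--
--     Returns:
--         List of repository dictionaries
--     """
--     repos = []
--
--     # Split by repository entries
--     lines = repos_text.strip().split("\n")
--
--     current_repo = {}
--     for line in lines:
--         line = line.strip()
--
--         if line.startswith("Name:"):
--             if current_repo:  # Save previous repo
--                 repos.append(current_repo)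
--             current_repo = {"name": line.replace("Name:", "").strip()}
--
--         elif line.startswith("Description:"):
--             current_repo["description"] = line.replace("Description:", "").strip()
--
--         elif line.startswith("Link:"):
--             current_repo["link"] = line.replace("Link:", "").strip()
--
--     # Add last repo
--     if current_repo:
--         repos.append(current_repo)
--
--     return repos
-- ===== SOURCE B (Python) =====
-- def _parse_repos_text(repos_text: str):
--     # Two-phase: first group lines into segments at every "Name:" boundary,
--     # then parse each segment into a dict independently; keep non-empty dicts.
--     lines = [line.strip() for line in repos_text.strip().split("\n")]
--     segments = [[]]
--     for line in lines:
--         if line.startswith("Name:"):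
--             segments.append([line])
--         else:
--             segments[-1].append(line)
--     repos = []
--     for seg in segments:
--         repo = {}
--         for line in seg:
--             if line.startswith("Name:"):
--                 repo["name"] = line.replace("Name:", "").strip()
--             elif line.startswith("Description:"):
--                 repo["description"] = line.replace("Description:", "").strip()
--             elif line.startswith("Link:"):
--                 repo["link"] = line.replace("Link:", "").strip()
--         if repo:
--             repos.append(repo)
--     return repos
-- ===== Notes on version B (the rewrite author's own statement) =====
-- stated objective: alternative
-- what changed: Replaces A's single flush-on-Name state machine (one dict threaded through the whole line loop) with a two-phase decomposition: a grouping pass that partitions the lines into segments at each 'Name:' boundary, then an independent per-segment parse that builds each dict from scratch and keeps it if non-empty.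
import Mathlib
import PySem

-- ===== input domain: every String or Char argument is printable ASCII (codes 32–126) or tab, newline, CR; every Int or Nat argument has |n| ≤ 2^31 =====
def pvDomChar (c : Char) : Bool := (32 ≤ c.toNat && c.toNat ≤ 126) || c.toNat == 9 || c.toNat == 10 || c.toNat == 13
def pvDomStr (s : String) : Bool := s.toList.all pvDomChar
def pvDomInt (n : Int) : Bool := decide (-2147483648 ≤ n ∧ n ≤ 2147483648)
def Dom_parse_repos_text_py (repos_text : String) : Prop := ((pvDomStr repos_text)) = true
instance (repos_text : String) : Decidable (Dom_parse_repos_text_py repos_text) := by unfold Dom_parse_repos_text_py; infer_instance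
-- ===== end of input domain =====

-- B replaces A's flush-on-"Name:" state machine by a two-phase decomposition (group the lines into
-- segments at "Name:" boundaries, then parse each segment independently); alternative, same cost.


-- ===== PORT A =====
def parse_repos_text_py (repos_text : String) : List (List (String × String)) :=
  -- split? is always `some` here because the separator "\n" is non-empty
  let lines := (PySem.Str.split? (PySem.Str.strip repos_text) "\n").getD []
  let st := lines.foldl
    (fun (st : List (List (String × String)) × PySem.Dict String String) line =>
      let line := PySem.Str.strip line
      if PySem.Str.startswith line "Name:" then
        ((if st.2.items ≠ [] then st.1 ++ [st.2.items] else st.1),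
         PySem.Dict.mk [("name", PySem.Str.strip (PySem.Str.replace line "Name:" ""))])
      else if PySem.Str.startswith line "Description:" then
        (st.1, st.2.insert "description" (PySem.Str.strip (PySem.Str.replace line "Description:" "")))
      else if PySem.Str.startswith line "Link:" then
        (st.1, st.2.insert "link" (PySem.Str.strip (PySem.Str.replace line "Link:" "")))
      else (st.1, st.2))
    ([], PySem.Dict.mk [])
  if st.2.items ≠ [] then st.1 ++ [st.2.items] else st.1

-- ===== PORT B =====
-- per-segment parse ('for line in seg' body of Source B)
def pvParseSeg (seg : List String) : PySem.Dict String String :=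
  seg.foldl
    (fun repo line =>
      if PySem.Str.startswith line "Name:" then
        repo.insert "name" (PySem.Str.strip (PySem.Str.replace line "Name:" ""))
      else if PySem.Str.startswith line "Description:" then
        repo.insert "description" (PySem.Str.strip (PySem.Str.replace line "Description:" ""))
      else if PySem.Str.startswith line "Link:" then
        repo.insert "link" (PySem.Str.strip (PySem.Str.replace line "Link:" ""))
      else repo)
    (PySem.Dict.mk [])

def parse_repos_text_py_alt (repos_text : String) : List (List (String × String)) :=
  -- split? is always `some` here because the separator "\n" is non-empty
  let lines := ((PySem.Str.split? (PySem.Str.strip repos_text) "\n").getD []).map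
    (fun line => PySem.Str.strip line)
  -- grouping pass: segments = st.1 ++ [st.2]  (st.2 is segments[-1])
  let st := lines.foldl
    (fun (st : List (List String) × List String) line =>
      if PySem.Str.startswith line "Name:" then (st.1 ++ [st.2], [line])
      else (st.1, st.2 ++ [line]))
    ([], [])
  let segments := st.1 ++ [st.2]
  segments.foldl
    (fun repos seg =>
      let repo := pvParseSeg seg
      if repo.items ≠ [] then repos ++ [repo.items] else repos)
    []

-- ===== PRECONDITION & SPEC =====
def Spec_parse_repos_text_py (repos_text : String) (out : List (List (String × String))) : Prop := out = parse_repos_text_py_alt repos_text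
instance (repos_text : String) (out : List (List (String × String))) : Decidable (Spec_parse_repos_text_py repos_text out) := by unfold Spec_parse_repos_text_py; infer_instance

-- ===== CLAIM (what is proved, stated in full; the proofs are below) =====
def Claim_equal_parse_repos_text_py : Prop := ∀ (repos_text : String), Dom_parse_repos_text_py repos_text → Spec_parse_repos_text_py repos_text (parse_repos_text_py repos_text)

-- ===== LEMMAS AND PROOFS =====

-- A's loop body on an already-stripped line
def pvStepA (st : List (List (String × String)) × PySem.Dict String String) (line : String) :
    List (List (String × String)) × PySem.Dict String String :=
  if PySem.Str.startswith line "Name:" then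
    ((if st.2.items ≠ [] then st.1 ++ [st.2.items] else st.1),
      PySem.Dict.mk [("name", PySem.Str.strip (PySem.Str.replace line "Name:" ""))])
  else if PySem.Str.startswith line "Description:" then
    (st.1, st.2.insert "description" (PySem.Str.strip (PySem.Str.replace line "Description:" "")))
  else if PySem.Str.startswith line "Link:" then
    (st.1, st.2.insert "link" (PySem.Str.strip (PySem.Str.replace line "Link:" "")))
  else (st.1, st.2)

-- B's grouping-loop body
def pvStepB (st : List (List String) × List String) (line : String) :
    List (List String) × List String :=
  if PySem.Str.startswith line "Name:" then (st.1 ++ [st.2], [line]) else (st.1, st.2 ++ [line])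

-- B's per-segment line step (the body of pvParseSeg's fold)
def pvStepSeg (repo : PySem.Dict String String) (line : String) : PySem.Dict String String :=
  if PySem.Str.startswith line "Name:" then
    repo.insert "name" (PySem.Str.strip (PySem.Str.replace line "Name:" ""))
  else if PySem.Str.startswith line "Description:" then
    repo.insert "description" (PySem.Str.strip (PySem.Str.replace line "Description:" ""))
  else if PySem.Str.startswith line "Link:" then
    repo.insert "link" (PySem.Str.strip (PySem.Str.replace line "Link:" ""))
  else repo

-- B's final (flushing) fold over segments
def pvFlush (segs : List (List String)) : List (List (String × String)) :=
  segs.foldl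
    (fun repos seg =>
      let repo := pvParseSeg seg
      if repo.items ≠ [] then repos ++ [repo.items] else repos)
    []

theorem pvParseSeg_append (seg : List String) (l : String) :
    pvParseSeg (seg ++ [l]) = pvStepSeg (pvParseSeg seg) l := by
  simp only [pvParseSeg, List.foldl_append, List.foldl_cons, List.foldl_nil]
  rfl

theorem pvParseSeg_singleton_name (l : String) (h : PySem.Str.startswith l "Name:" = true) :
    pvParseSeg [l] = PySem.Dict.mk [("name", PySem.Str.strip (PySem.Str.replace l "Name:" ""))] := by
  have h0 : pvParseSeg [l] = pvStepSeg (PySem.Dict.mk []) l := rfl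
  rw [h0]; unfold pvStepSeg; rw [if_pos h]; rfl

theorem pvFlush_append (segs : List (List String)) (s : List String) :
    pvFlush (segs ++ [s]) =
      (if (pvParseSeg s).items ≠ [] then pvFlush segs ++ [(pvParseSeg s).items] else pvFlush segs) := by
  unfold pvFlush
  rw [List.foldl_append]
  rfl

-- the loop invariant: A's state is the flush/parse image of B's grouping state
theorem pv_inv (ls : List String) (done : List (List String)) (last : List String) :
    ls.foldl pvStepA (pvFlush done, pvParseSeg last)
      = (pvFlush (ls.foldl pvStepB (done, last)).1, pvParseSeg (ls.foldl pvStepB (done, last)).2) := by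
  induction ls generalizing done last with
  | nil => rfl
  | cons l ls ih =>
    simp only [List.foldl_cons]
    by_cases h : PySem.Str.startswith l "Name:" = true
    · have hs : pvStepA (pvFlush done, pvParseSeg last) l
          = (pvFlush (done ++ [last]), pvParseSeg [l]) := by
        rw [pvFlush_append, pvParseSeg_singleton_name l h]
        unfold pvStepA
        rw [if_pos h]
      have hb : pvStepB (done, last) l = (done ++ [last], [l]) := by
        unfold pvStepB; rw [if_pos h]
      rw [hs, hb, ih]
    · have hs : pvStepA (pvFlush done, pvParseSeg last) l
          = (pvFlush done, pvParseSeg (last ++ [l])) := by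
        rw [pvParseSeg_append]
        unfold pvStepA pvStepSeg
        rw [if_neg h, if_neg h]
        split_ifs <;> rfl
      have hb : pvStepB (done, last) l = (done, last ++ [l]) := by
        unfold pvStepB; rw [if_neg h]
      rw [hs, hb, ih]

set_option maxHeartbeats 1600000 in
theorem pv_portA_eq (t : String) :
    parse_repos_text_py t =
      (if ((((PySem.Str.split? (PySem.Str.strip t) "\n").getD []).map PySem.Str.strip).foldl pvStepA
            ([], PySem.Dict.mk [])).2.items ≠ [] then
        ((((PySem.Str.split? (PySem.Str.strip t) "\n").getD []).map PySem.Str.strip).foldl pvStepA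
            ([], PySem.Dict.mk [])).1
          ++ [((((PySem.Str.split? (PySem.Str.strip t) "\n").getD []).map PySem.Str.strip).foldl pvStepA
            ([], PySem.Dict.mk [])).2.items]
      else
        ((((PySem.Str.split? (PySem.Str.strip t) "\n").getD []).map PySem.Str.strip).foldl pvStepA
            ([], PySem.Dict.mk [])).1) := by
  unfold parse_repos_text_py
  rw [List.foldl_map]
  rfl

theorem pv_portB_eq (t : String) :
    parse_repos_text_py_alt t =
      pvFlush (((((PySem.Str.split? (PySem.Str.strip t) "\n").getD []).map PySem.Str.strip).foldl
            pvStepB ([], [])).1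
        ++ [((((PySem.Str.split? (PySem.Str.strip t) "\n").getD []).map PySem.Str.strip).foldl
            pvStepB ([], [])).2]) := rfl

-- ===== VERDICT (by name: the statement is the Claim_ definition above) =====
theorem parse_repos_text_py_spec : Claim_equal_parse_repos_text_py := by
  intro t _
  show parse_repos_text_py t = parse_repos_text_py_alt t
  have h := pv_inv ((((PySem.Str.split? (PySem.Str.strip t) "\n").getD []).map PySem.Str.strip)) [] []
  have h0 : pvFlush [] = ([] : List (List (String × String))) := rfl
  have h1 : pvParseSeg [] = PySem.Dict.mk [] := rfl
  rw [h0, h1] at h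
  rw [pv_portA_eq, pv_portB_eq, h, pvFlush_append]
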